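-- pv_equiv track=rewrite | github.com/Sara-Jo/Algorithm | Programmers/17683.py | solution
-- ===== SOURCE A (Python) =====
-- def solution(m, musicinfos):
--     def change_hash(str):
--         if 'C#' in str:
--             str = str.replace('C#', 'c')
--         if 'D#' in str:
--             str = str.replace('D#', 'd')
--         if 'F#' in str:
--             str = str.replace('F#', 'f')
--         if 'G#' in str:
--             str = str.replace('G#', 'g')
--         if 'A#' in str:
--             str = str.replace('A#', 'a')
--         return str
--
--     m = change_hash(m)
--     len_musicinfos = len(musicinfos)
--     candidates = []
--     for i in range(len_musicinfos):
--         start, end, title, melody = map(str, musicinfos[i].split(','))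
--         melody = change_hash(melody)
--
--         s_h, s_m = map(int, start.split(':'))
--         e_h, e_m = map(int, end.split(':'))
--         duration = (e_h * 60 + e_m) - (s_h * 60 + s_m)
--
--         played_music = ""
--         played_music += melody * (duration // len(melody))
--         played_music += melody[:duration % len(melody)]
--
--         if m in played_music:
--             candidates.append((duration, i, title))
--
--     if len(candidates) == 0:
--         return "(None)"
--     elif len(candidates) == 1:
--         return candidates[0][2]
--     else:
--         candidates = sorted(candidates, key=lambda x: (-x[0], x[1]))
--         return candidates[0][2]
-- ===== SOURCE B (Python) =====
-- def solution(m, musicinfos):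
--     # single pass keeping the best (longest, then earliest) match; no candidate list, no sort
--     PAIRS = (('C#', 'c'), ('D#', 'd'), ('F#', 'f'), ('G#', 'g'), ('A#', 'a'))
--
--     def change_hash(s):
--         for old, new in PAIRS:
--             if old in s:
--                 s = s.replace(old, new)
--         return s
--
--     def to_min(t):
--         h, mm = t.split(':')
--         return int(h) * 60 + int(mm)
--
--     m = change_hash(m)
--     best = None
--     for info in musicinfos:
--         start, end, title, melody = info.split(',')
--         melody = change_hash(melody)
--         duration = to_min(end) - to_min(start)
--         played = melody * (duration // len(melody)) + melody[:duration % len(melody)]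
--         if m in played and (best is None or duration > best[0]):
--             best = (duration, title)
--     return "(None)" if best is None else best[1]
-- ===== Notes on version B (the rewrite author's own statement) =====
-- stated objective: alternative
-- what changed: Replaces the index loop that collects a (duration, index, title) candidate list and then sorts it by (-duration, index) with a direct single-pass fold over musicinfos that keeps only the current best (strict '>' so the earliest longest match wins), dropping the candidate list, the indices and the final sort.
import Mathlib
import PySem

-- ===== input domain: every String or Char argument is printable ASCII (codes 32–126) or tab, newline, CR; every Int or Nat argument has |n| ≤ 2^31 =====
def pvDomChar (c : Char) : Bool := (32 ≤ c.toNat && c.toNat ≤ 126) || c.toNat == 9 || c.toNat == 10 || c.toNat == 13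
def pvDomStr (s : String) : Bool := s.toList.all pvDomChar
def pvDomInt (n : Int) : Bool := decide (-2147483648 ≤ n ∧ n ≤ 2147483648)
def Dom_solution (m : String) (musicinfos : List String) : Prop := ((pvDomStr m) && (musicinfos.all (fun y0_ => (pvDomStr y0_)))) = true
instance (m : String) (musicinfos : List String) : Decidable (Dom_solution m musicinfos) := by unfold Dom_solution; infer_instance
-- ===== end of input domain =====

-- B replaces A's collect-candidates-then-sort-by-(-duration, index) phase by a single pass that
-- keeps the current best (strict '>', so the earliest longest match wins); same parsing, no sort.

-- ===== PORT A =====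
-- change_hash: five sequential guarded replaces, exactly as in A (on the char list: PySem.Chars is exact there)
def pvHashA (s : List Char) : List Char :=
  let s := if PySem.Chars.isIn ['C', '#'] s then PySem.Chars.replace s ['C', '#'] ['c'] else s
  let s := if PySem.Chars.isIn ['D', '#'] s then PySem.Chars.replace s ['D', '#'] ['d'] else s
  let s := if PySem.Chars.isIn ['F', '#'] s then PySem.Chars.replace s ['F', '#'] ['f'] else s
  let s := if PySem.Chars.isIn ['G', '#'] s then PySem.Chars.replace s ['G', '#'] ['g'] else s
  let s := if PySem.Chars.isIn ['A', '#'] s then PySem.Chars.replace s ['A', '#'] ['a'] else s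
  s

-- A's loop body for index i and line musicinfos[i]; acc is the candidates list.
-- Where Python raises (unpacking ≠ 4 / ≠ 2 fields, int() failure, len(melody) == 0) the port
-- returns acc unchanged; those inputs are excluded by Pre_solution.
def pvStepA (mh : List Char) (acc : List (Int × Int × String)) (p : Int × String) :
    List (Int × Int × String) :=
  match PySem.Str.split? p.2 "," with
  | some [start, end_, title, melody] =>
    let mel := pvHashA melody.toList
    match PySem.Str.split? start ":", PySem.Str.split? end_ ":" with
    | some [sh, sm], some [eh, em] =>
      match PySem.Int.ofStr? sh, PySem.Int.ofStr? sm, PySem.Int.ofStr? eh, PySem.Int.ofStr? em with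
      | some shv, some smv, some ehv, some emv =>
        let duration := (ehv * 60 + emv) - (shv * 60 + smv)
        if mel = [] then acc
        else
          let played := PySem.List.pyRepeat mel (PySem.Int.floordiv duration (mel.length : Int)) ++
                        PySem.List.slice mel none (some (PySem.Int.mod duration (mel.length : Int)))
          if PySem.Chars.isIn mh played then acc ++ [(duration, p.1, title)] else acc
      | _, _, _, _ => acc
    | _, _ => acc
  | _ => acc

def solution (m : String) (musicinfos : List String) : String :=
  let mh := pvHashA m.toList
  let lenM := PySem.List.len musicinfos
  let candidates := (PySem.List.pyRange 0 lenM 1).foldl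
      (fun acc i => pvStepA mh acc (i, PySem.List.pyGetD musicinfos i "")) []
  if candidates.length = 0 then "(None)"
  else if candidates.length = 1 then (PySem.List.pyGetD candidates 0 (0, 0, "")).2.2
  else (PySem.List.pyGetD
          (PySem.List.sorted2 candidates (fun x => -x.1) (fun x => x.2.1)) 0 (0, 0, "")).2.2

-- ===== PORT B =====
def pvPairs : List (List Char × List Char) :=
  [(['C', '#'], ['c']), (['D', '#'], ['d']), (['F', '#'], ['f']), (['G', '#'], ['g']), (['A', '#'], ['a'])]

-- B's change_hash: one loop over the pair table
def pvHashB (s : List Char) : List Char :=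
  pvPairs.foldl (fun s p => if PySem.Chars.isIn p.1 s then PySem.Chars.replace s p.1 p.2 else s) s

-- B's to_min helper; none where Python raises (excluded by Pre_solution)
def pvToMin? (t : String) : Option Int :=
  match PySem.Str.split? t ":" with
  | some [h, mm] =>
    match PySem.Int.ofStr? h, PySem.Int.ofStr? mm with
    | some hv, some mv => some (hv * 60 + mv)
    | _, _ => none
  | _ => none

-- B's loop body: update the running best (strict '>')
def pvStepB (mh : List Char) (best : Option (Int × String)) (info : String) :
    Option (Int × String) :=
  match PySem.Str.split? info "," with
  | some [start, end_, title, melody] =>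
    let mel := pvHashB melody.toList
    match pvToMin? end_, pvToMin? start with
    | some e, some s =>
      let duration := e - s
      if mel = [] then best
      else
        let played := PySem.List.pyRepeat mel (PySem.Int.floordiv duration (mel.length : Int)) ++
                      PySem.List.slice mel none (some (PySem.Int.mod duration (mel.length : Int)))
        if PySem.Chars.isIn mh played then
          match best with
          | none => some (duration, title)
          | some b => if duration > b.1 then some (duration, title) else best
        else best
    | _, _ => best
  | _ => best

def solution_alt (m : String) (musicinfos : List String) : String :=
  let mh := pvHashB m.toList
  match musicinfos.foldl (pvStepB mh) none with
  | none => "(None)"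
  | some b => b.2

-- ===== PRECONDITION & SPEC =====
-- Pre_solution excludes exactly the inputs on which Python A raises: a line whose ','-split is not
-- 4 fields (unpacking ValueError), a time whose ':'-split is not 2 int()-parsable fields
-- (ValueError), or an empty melody (ZeroDivisionError).
def pvTimeOk (t : String) : Bool :=
  match PySem.Str.split? t ":" with
  | some [h, mm] => (PySem.Int.ofStr? h).isSome && (PySem.Int.ofStr? mm).isSome
  | _ => false

def pvLineOk (line : String) : Bool :=
  match PySem.Str.split? line "," with
  | some [start, end_, _, melody] => pvTimeOk start && pvTimeOk end_ && melody ≠ ""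
  | _ => false

def Pre_solution (m : String) (musicinfos : List String) : Prop :=
  musicinfos.all pvLineOk = true

instance (m : String) (musicinfos : List String) : Decidable (Pre_solution m musicinfos) := by
  unfold Pre_solution; infer_instance

def pvWitness_solution : String × List String :=
  ("ABC", ["12:00,12:14,WORLD,ABCDEF", "12:00,12:04,HELLO,C#ABC"])

def Spec_solution (m : String) (musicinfos : List String) (out : String) : Prop := out = solution_alt m musicinfos
instance (m : String) (musicinfos : List String) (out : String) : Decidable (Spec_solution m musicinfos out) := by unfold Spec_solution; infer_instance

-- ===== CLAIM (what is proved, stated in full; the proofs are below) =====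
def Claim_equal_solution : Prop := ∀ (m : String) (musicinfos : List String), Dom_solution m musicinfos → Pre_solution m musicinfos → Spec_solution m musicinfos (solution m musicinfos)

-- ===== LEMMAS AND PROOFS =====

-- the per-line candidate both loops agree on: some (duration, title) iff the line parses,
-- melody hashes to a nonempty string and the played melody contains mh
def pvCand? (mh : List Char) (line : String) : Option (Int × String) :=
  match PySem.Str.split? line "," with
  | some [start, end_, title, melody] =>
    let mel := pvHashA melody.toList
    match PySem.Str.split? start ":", PySem.Str.split? end_ ":" with
    | some [sh, sm], some [eh, em] =>
      match PySem.Int.ofStr? sh, PySem.Int.ofStr? sm, PySem.Int.ofStr? eh, PySem.Int.ofStr? em with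
      | some shv, some smv, some ehv, some emv =>
        let duration := (ehv * 60 + emv) - (shv * 60 + smv)
        if mel = [] then none
        else
          let played := PySem.List.pyRepeat mel (PySem.Int.floordiv duration (mel.length : Int)) ++
                        PySem.List.slice mel none (some (PySem.Int.mod duration (mel.length : Int)))
          if PySem.Chars.isIn mh played then some (duration, title) else none
      | _, _, _, _ => none
    | _, _ => none
  | _ => none

theorem pvHashB_eq (s : List Char) : pvHashB s = pvHashA s := by
  simp [pvHashB, pvPairs, pvHashA, List.foldl]

theorem pvStepA_eq (mh : List Char) (acc : List (Int × Int × String)) (i : Int) (line : String) :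
    pvStepA mh acc (i, line) =
      match pvCand? mh line with
      | some (d, t) => acc ++ [(d, i, t)]
      | none => acc := by
  unfold pvStepA pvCand?
  repeat' split
  all_goals try rfl
  all_goals try simp_all only [Option.some.injEq, List.cons.injEq, reduceCtorEq]
  all_goals rename_i heqX
  all_goals split_ifs at heqX ⊢ <;> simp_all only [Option.some.injEq, Prod.mk.injEq]

-- B-shaped variant of pvCand? (proof-only), following pvStepB's match structure
def pvCandB? (mh : List Char) (info : String) : Option (Int × String) :=
  match PySem.Str.split? info "," with
  | some [start, end_, title, melody] =>
    let mel := pvHashA melody.toList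
    match pvToMin? end_, pvToMin? start with
    | some e, some s =>
      let duration := e - s
      if mel = [] then none
      else
        let played := PySem.List.pyRepeat mel (PySem.Int.floordiv duration (mel.length : Int)) ++
                      PySem.List.slice mel none (some (PySem.Int.mod duration (mel.length : Int)))
        if PySem.Chars.isIn mh played then some (duration, title) else none
    | _, _ => none
  | _ => none

theorem pvCandB?_eq (mh : List Char) (line : String) : pvCandB? mh line = pvCand? mh line := by
  unfold pvCandB? pvCand? pvToMin?
  cases PySem.Str.split? line "," with
  | none => rfl
  | some l =>
    match l with
    | [] => rfl
    | [_] => rfl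
    | [_, _] => rfl
    | [_, _, _] => rfl
    | (_ :: _ :: _ :: _ :: _ :: _) => rfl
    | [start, end_, title, melody] =>
      simp only
      rcases hs : PySem.Str.split? start ":" with _ | (_ | ⟨sh, _ | ⟨sm, _ | ⟨x3, xs3⟩⟩⟩) <;>
        rcases he : PySem.Str.split? end_ ":" with _ | (_ | ⟨eh, _ | ⟨em, _ | ⟨y3, ys3⟩⟩⟩) <;>
          simp only <;> try rfl
      all_goals (rcases hc : PySem.Int.ofStr? eh with _ | c <;>
        rcases hd : PySem.Int.ofStr? em with _ | d <;> simp only [hc, hd] <;> try rfl)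
      all_goals (rcases ha : PySem.Int.ofStr? sh with _ | a <;>
        rcases hb : PySem.Int.ofStr? sm with _ | b <;> simp only [ha, hb] <;> rfl)

theorem pvStepB_eq (mh : List Char) (best : Option (Int × String)) (line : String) :
    pvStepB mh best line =
      match pvCand? mh line with
      | some (d, t) =>
        match best with
        | none => some (d, t)
        | some b => if d > b.1 then some (d, t) else best
      | none => best := by
  rw [← pvCandB?_eq]
  unfold pvStepB pvCandB?
  simp only [pvHashB_eq]
  repeat' split
  all_goals try rfl
  all_goals try simp_all only [Option.some.injEq, List.cons.injEq, Prod.mk.injEq, reduceCtorEq]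
  all_goals rename_i heqX
  all_goals try (split_ifs at heqX ⊢ <;> simp_all only [Option.some.injEq, Prod.mk.injEq, reduceCtorEq])
  all_goals simp_all only [not_true]

-- the common selection: leftmost maximal duration
def pvSel (c : List (Int × Int × String)) : Option (Int × Int × String) :=
  c.foldl (fun b x => match b with
    | none => some x
    | some b' => if x.1 > b'.1 then some x else b) none

-- A's candidates list (enumerate form) and B's running best
def pvCandList (mh : List Char) (lines : List String) : List (Int × Int × String) :=
  (PySem.List.enumerate lines 0).foldl (pvStepA mh) []

def pvBest (mh : List Char) (lines : List String) : Option (Int × String) :=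
  lines.foldl (pvStepB mh) none

-- the tie-break relation sorted2 uses for key (fun x => (-x.1, x.2.1))
def pvBefore (a b : Int × Int × String) : Bool :=
  decide (-a.1 < -b.1) || (!decide (-b.1 < -a.1) && decide (a.2.1 < b.2.1))

theorem pvCandList_pyRange (mh : List Char) (lines : List String) :
    (PySem.List.pyRange 0 (PySem.List.len lines) 1).foldl
      (fun acc i => pvStepA mh acc (i, PySem.List.pyGetD lines i "")) [] = pvCandList mh lines := by
  rw [pvCandList, PySem.List.enumerate_eq_map_pyRange lines "", List.foldl_map]

theorem pvCandList_append (mh : List Char) (ys : List String) (y : String) :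
    pvCandList mh (ys ++ [y]) = pvStepA mh (pvCandList mh ys) ((ys.length : Int), y) := by
  rw [pvCandList, pvCandList, PySem.List.enumerate_append]
  simp [PySem.List.enumerate_cons, PySem.List.enumerate_nil, List.foldl_append]

theorem pvBest_append (mh : List Char) (ys : List String) (y : String) :
    pvBest mh (ys ++ [y]) = pvStepB mh (pvBest mh ys) y := by
  rw [pvBest, pvBest, List.foldl_append]; rfl

theorem pvSel_append (c : List (Int × Int × String)) (x : Int × Int × String) :
    pvSel (c ++ [x]) = match pvSel c with
      | none => some x
      | some b => if x.1 > b.1 then some x else pvSel c := by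
  rw [pvSel, pvSel, List.foldl_append]
  cases (c.foldl (fun b x => match b with
    | none => some x
    | some b' => if x.1 > b'.1 then some x else b) none) <;> rfl

theorem pvSorted2_append (c : List (Int × Int × String)) (x : Int × Int × String) :
    PySem.List.sorted2 (c ++ [x]) (fun z => -z.1) (fun z => z.2.1) =
      PySem.List.insertBy pvBefore x (PySem.List.sorted2 c (fun z => -z.1) (fun z => z.2.1)) := by
  simp only [PySem.List.sorted2, List.foldl_append]
  rfl

theorem pvHead?_insertBy_cons {α : Type} (before : α → α → Bool) (x y : α) (ys : List α) :
    (PySem.List.insertBy before x (y :: ys)).head? = some (if before x y then x else y) := by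
  by_cases h : before x y <;> simp [PySem.List.insertBy, h]

theorem pvInvariant (mh : List Char) (lines : List String) :
    pvBest mh lines = (pvSel (pvCandList mh lines)).map (fun c => (c.1, c.2.2)) ∧
    (∀ c ∈ pvCandList mh lines, c.2.1 < (lines.length : Int)) ∧
    (PySem.List.sorted2 (pvCandList mh lines) (fun z => -z.1) (fun z => z.2.1)).head? =
      pvSel (pvCandList mh lines) ∧
    (∀ b, pvSel (pvCandList mh lines) = some b → b ∈ pvCandList mh lines) := by
  induction lines using List.reverseRecOn with
  | nil => exact ⟨rfl, by simp [pvCandList, PySem.List.enumerate_nil], rfl, by simp [pvCandList, PySem.List.enumerate_nil, pvSel]⟩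
  | append_singleton ys y ih =>
    obtain ⟨ih1, ih2, ih3, ih4⟩ := ih
    rw [pvCandList_append, pvBest_append, pvStepA_eq, pvStepB_eq]
    cases hc : pvCand? mh y with
    | none =>
      simp only
      refine ⟨by rw [ih1], ?_, ih3, ih4⟩
      intro c hcmem
      have := ih2 c hcmem
      simp only [List.length_append, List.length_singleton]
      push_cast
      omega
    | some dt =>
      obtain ⟨d, t⟩ := dt
      simp only
      have hx2 : ∀ c ∈ pvCandList mh ys ++ [(d, (ys.length : Int), t)],
          c.2.1 < ((ys ++ [y]).length : Int) := by
        intro c hcmem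
        rcases List.mem_append.1 hcmem with h | h
        · have := ih2 c h
          simp only [List.length_append, List.length_singleton]
          push_cast
          omega
        · simp only [List.mem_singleton] at h
          subst h
          simp only [List.length_append, List.length_singleton]
          push_cast
          omega
      refine ⟨?_, hx2, ?_, ?_⟩
      · -- running best = projected selection
        rw [ih1, pvSel_append]
        cases hs : pvSel (pvCandList mh ys) with
        | none => rfl
        | some b =>
          simp only [Option.map_some]
          by_cases hgt : d > b.1
          · simp [hgt]
          · simp [hgt]
      · -- head of the sorted list = selection
        rw [pvSorted2_append, pvSel_append]
        cases hsrt : PySem.List.sorted2 (pvCandList mh ys) (fun z => -z.1) (fun z => z.2.1) with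
        | nil =>
          have hsel : pvSel (pvCandList mh ys) = none := by rw [← ih3, hsrt]; rfl
          rw [hsel]
          simp [PySem.List.insertBy]
        | cons h tl =>
          have hsel : pvSel (pvCandList mh ys) = some h := by rw [← ih3, hsrt]; rfl
          rw [hsel]
          have hmem : h ∈ pvCandList mh ys := ih4 h hsel
          have hidx : h.2.1 < (ys.length : Int) := ih2 h hmem
          have hb2 : ¬ ((d, (ys.length : Int), t).2.1 < h.2.1) := by simp; omega
          by_cases hlt : h.1 < d
          · simp [pvHead?_insertBy_cons, pvBefore, hlt, hb2]
          · simp [pvHead?_insertBy_cons, pvBefore, hlt, hb2]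
      · -- the selection is a member
        intro b hb
        rw [pvSel_append] at hb
        cases hs : pvSel (pvCandList mh ys) with
        | none =>
          rw [hs] at hb
          simp only [Option.some.injEq] at hb
          subst hb
          simp
        | some b' =>
          rw [hs] at hb
          simp only at hb
          by_cases hgt : d > b'.1
          · rw [if_pos hgt] at hb
            simp only [Option.some.injEq] at hb
            subst hb
            simp
          · rw [if_neg hgt] at hb
            simp only [Option.some.injEq] at hb
            subst hb
            exact List.mem_append_left _ (ih4 b' hs)

-- ===== VERDICT (by name: the statement is the Claim_ definition above) =====
theorem solution_spec : Claim_equal_solution := by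
  intro m infos _hdom _hpre
  unfold Spec_solution solution solution_alt
  simp only [pvHashB_eq, pvCandList_pyRange]
  obtain ⟨h1, _h2, h3, _h4⟩ := pvInvariant (pvHashA m.toList) infos
  rw [← pvBest, h1]
  cases hcl : pvCandList (pvHashA m.toList) infos with
  | nil => simp [pvSel]
  | cons c cs =>
    cases cs with
    | nil =>
      have hsel : pvSel [c] = some c := rfl
      simp [hsel, PySem.List.pyGetD_zero_cons]
    | cons c2 cs2 =>
      rw [hcl] at h3
      have hlen : (PySem.List.sorted2 (c :: c2 :: cs2) (fun z => -z.1) (fun z => z.2.1)).length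
          = (c :: c2 :: cs2).length :=
        (PySem.List.sorted2_perm _ _ _ _).length_eq
      cases hsrt : PySem.List.sorted2 (c :: c2 :: cs2) (fun z => -z.1) (fun z => z.2.1) with
      | nil => rw [hsrt] at hlen; simp at hlen
      | cons h tl =>
        have hsel : pvSel (c :: c2 :: cs2) = some h := by rw [← h3, hsrt]; rfl
        rw [hsel]
        simp [PySem.List.pyGetD_zero_cons]
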